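-- pv_equiv track=rewrite | github.com/Mohamed-Fawzi/Password-Generator- | password generator.py | create_list_of_2_names
-- ===== SOURCE A (Python) =====
-- def create_list_of_subsequence(word):
--     name=[]
--     for i in range ( len (word)-1):
--         name.append(word[i])
--         for j in range (i+1 ,  len (word)) :
--             name.append( name[-1] + word[j] )
--     name.append( word[-1] )
--     return( name )
--
-- def create_list_of_2_names(word1,word2):
--
--     output=[]
--     l1=create_list_of_subsequence(word1)[:len(word1)]
--     l2=create_list_of_subsequence(word2)[:len(word2)]
--     for ch1 in l1:
--         for ch2 in l2:
--             output.append(ch1+ch2)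
--
--     return( output)
-- ===== SOURCE B (Python) =====
-- def create_list_of_2_names(word1, word2):
--     # build the prefix lists directly (A generates all O(n^2) substrings and slices)
--     p1 = [word1[:k] for k in range(1, len(word1) + 1)]
--     p2 = [word2[:k] for k in range(1, len(word2) + 1)]
--     return [a + b for a in p1 for b in p2]
-- ===== Notes on version B (the rewrite author's own statement) =====
-- stated objective: simpler
-- what changed: B builds the two prefix lists directly with slices instead of generating every contiguous substring of each word and truncating, then cross-concatenates them with a comprehension.
-- crash fix: A raises IndexError (word[-1] on an empty string) when word1 or word2 is empty; B returns [] there. — e.g. on create_list_of_2_names("", "ab"): A raises IndexError, B returns []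
import Mathlib
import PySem

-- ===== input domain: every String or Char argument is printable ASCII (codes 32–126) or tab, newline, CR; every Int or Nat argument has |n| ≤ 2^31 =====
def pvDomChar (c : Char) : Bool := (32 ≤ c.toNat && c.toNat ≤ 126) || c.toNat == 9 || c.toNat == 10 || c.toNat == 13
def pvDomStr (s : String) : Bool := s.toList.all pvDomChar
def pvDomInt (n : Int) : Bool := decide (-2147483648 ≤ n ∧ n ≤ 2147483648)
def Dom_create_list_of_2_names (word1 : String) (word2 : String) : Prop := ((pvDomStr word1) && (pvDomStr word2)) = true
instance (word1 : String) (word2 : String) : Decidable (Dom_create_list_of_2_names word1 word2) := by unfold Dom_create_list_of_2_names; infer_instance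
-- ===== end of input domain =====

-- B replaces A's generate-all-substrings-then-truncate with direct prefix lists (shorter and plainer; same overall cost, dominated by the output size).
-- A raises IndexError on an empty word (word[-1]); those inputs are outside Pre_ and B returns [] there.


-- ===== PORT A =====
-- create_list_of_subsequence, on List Char (strings handled per PySem convention);
-- word[-1] / name[-1] are PySem.List.pyGetD with index -1 (default never read inside Pre_).
def pvSubseqA (w : List Char) : List (List Char) :=
  ((PySem.List.pyRange 0 ((w.length : Int) - 1)).foldl (fun name i =>
      (PySem.List.pyRange (i + 1) (w.length : Int)).foldl
        (fun name j => name ++ [PySem.List.pyGetD name (-1) [] ++ [PySem.List.pyGetD w j ' ']])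
        (name ++ [[PySem.List.pyGetD w i ' ']]))
    []) ++ [[PySem.List.pyGetD w (-1) ' ']]

def create_list_of_2_names (word1 : String) (word2 : String) : List String :=
  let l1 := PySem.List.slice (pvSubseqA word1.toList) none (some (word1.toList.length : Int))
  let l2 := PySem.List.slice (pvSubseqA word2.toList) none (some (word2.toList.length : Int))
  (l1.foldl (fun out ch1 => l2.foldl (fun out ch2 => out ++ [ch1 ++ ch2]) out) []).map String.ofList

-- ===== PORT B =====
-- [word[:k] for k in range(1, len(word)+1)]
def pvPrefixes (w : List Char) : List (List Char) :=
  (PySem.List.pyRange 1 ((w.length : Int) + 1)).map (fun k => PySem.List.slice w none (some k))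

def create_list_of_2_names_alt (word1 : String) (word2 : String) : List String :=
  ((pvPrefixes word1.toList).flatMap
    (fun a => (pvPrefixes word2.toList).map (fun b => a ++ b))).map String.ofList

-- ===== PRECONDITION & SPEC =====
-- Pre_ excludes exactly the inputs on which A raises IndexError: an empty word1 or word2.
def Pre_create_list_of_2_names (word1 : String) (word2 : String) : Prop :=
  word1.toList ≠ [] ∧ word2.toList ≠ []
instance (word1 : String) (word2 : String) : Decidable (Pre_create_list_of_2_names word1 word2) := by unfold Pre_create_list_of_2_names; infer_instance
def pvWitness_create_list_of_2_names : String × String := ("ab", "c")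

-- A raises IndexError when word1 or word2 is empty; B returns [] there.
def Raises_create_list_of_2_names (word1 : String) (word2 : String) : Prop :=
  word1.toList = [] ∨ word2.toList = []
instance (word1 : String) (word2 : String) : Decidable (Raises_create_list_of_2_names word1 word2) := by unfold Raises_create_list_of_2_names; infer_instance
def pvRaiseWitness_create_list_of_2_names : String × String := ("", "ab")
def pvRaiseWitnessOut_create_list_of_2_names : List String := []

def Spec_create_list_of_2_names (word1 : String) (word2 : String) (out : List String) : Prop := out = create_list_of_2_names_alt word1 word2
instance (word1 : String) (word2 : String) (out : List String) : Decidable (Spec_create_list_of_2_names word1 word2 out) := by unfold Spec_create_list_of_2_names; infer_instance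

-- ===== CLAIM (what is proved, stated in full; the proofs are below) =====
def Claim_equal_create_list_of_2_names : Prop := ∀ (word1 : String) (word2 : String), Dom_create_list_of_2_names word1 word2 → Pre_create_list_of_2_names word1 word2 → Spec_create_list_of_2_names word1 word2 (create_list_of_2_names word1 word2)
def Claim_raises_create_list_of_2_names : Prop := (∀ (word1 : String) (word2 : String), Dom_create_list_of_2_names word1 word2 → Raises_create_list_of_2_names word1 word2 → ¬ Pre_create_list_of_2_names word1 word2) ∧ (Dom_create_list_of_2_names (pvRaiseWitness_create_list_of_2_names.1) (pvRaiseWitness_create_list_of_2_names.2) ∧ Raises_create_list_of_2_names (pvRaiseWitness_create_list_of_2_names.1) (pvRaiseWitness_create_list_of_2_names.2) ∧ create_list_of_2_names_alt (pvRaiseWitness_create_list_of_2_names.1) (pvRaiseWitness_create_list_of_2_names.2) = pvRaiseWitnessOut_create_list_of_2_names)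

-- ===== LEMMAS AND PROOFS =====

-- name[-1] of a list just appended to is the appended element
theorem pvGetD_neg_one_append {α : Type} (l : List α) (x d : α) :
    PySem.List.pyGetD (l ++ [x]) (-1) d = x := by
  simp [PySem.List.pyGetD, PySem.List.pyGet?, PySem.List.pyIdx?]

-- the prefixes of w, by length 1..n
def pvPrefs (w : List Char) : List (List Char) :=
  (List.range w.length).map (fun i => w.take (i + 1))

theorem pvPrefixes_eq (w : List Char) : pvPrefixes w = pvPrefs w := by
  unfold pvPrefixes pvPrefs
  induction w.length with
  | zero => simp [PySem.List.pyRange]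
  | succ n ih =>
      rw [show ((n + 1 : Nat) : Int) + 1 = ((n : Int) + 1) + 1 by push_cast; ring,
        PySem.List.pyRange_one_succ_right (by omega), List.range_succ]
      simp only [List.map_append, ih, List.map_cons, List.map_nil]
      congr 1
      rw [show ((n : Int) + 1) = ((n + 1 : Nat) : Int) by push_cast; ring,
        PySem.List.slice_to_natCast]

-- the inner j-loop, started with last element w.take k, appends the longer prefixes
theorem pvInner (w : List Char) (m : Nat) : ∀ (k : Nat), 1 ≤ k → k + m = w.length →
    ∀ (acc : List (List Char)), PySem.List.pyGetD acc (-1) [] = w.take k →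
    (PySem.List.pyRange (k : Int) (w.length : Int)).foldl
      (fun name j => name ++ [PySem.List.pyGetD name (-1) [] ++ [PySem.List.pyGetD w j ' ']]) acc
    = acc ++ (List.range m).map (fun i => w.take (k + 1 + i)) := by
  induction m with
  | zero =>
      intro k _ hk acc _
      rw [show (k : Int) = (w.length : Int) by omega]
      simp [PySem.List.pyRange]
  | succ m ih =>
      intro k hk1 hk acc hlast
      have hkl : k < w.length := by omega
      rw [PySem.List.pyRange_one_cons (by exact_mod_cast hkl)]
      simp only [List.foldl_cons, hlast]
      rw [show (k : Int) + 1 = ((k + 1 : Nat) : Int) by push_cast; ring]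
      rw [PySem.List.pyGetD_ofNat w k ' ' hkl]
      have hstep : w.take k ++ [w[k]] = w.take (k + 1) :=
        (List.take_succ_eq_append_getElem hkl).symm
      rw [hstep, ih (k + 1) (by omega) (by omega) _ (pvGetD_neg_one_append _ _ _)]
      rw [List.range_succ_eq_map]
      simp [List.append_assoc, Function.comp]
      intro a _
      omega

-- each outer step only appends to name
theorem pvOuter_prefix (w : List Char) (l : List Int) (acc : List (List Char)) :
    ∃ r, (l.foldl (fun name i =>
        (PySem.List.pyRange (i + 1) (w.length : Int)).foldl
          (fun name j => name ++ [PySem.List.pyGetD name (-1) [] ++ [PySem.List.pyGetD w j ' ']])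
          (name ++ [[PySem.List.pyGetD w i ' ']])) acc) = acc ++ r := by
  induction l generalizing acc with
  | nil => exact ⟨[], by simp⟩
  | cons i t ih =>
      have hin : ∀ (l2 : List Int) (a : List (List Char)), ∃ r2,
          (l2.foldl (fun name j => name ++ [PySem.List.pyGetD name (-1) [] ++ [PySem.List.pyGetD w j ' ']]) a)
          = a ++ r2 := by
        intro l2
        induction l2 with
        | nil => exact fun a => ⟨[], by simp⟩
        | cons j t2 ih2 =>
            intro a
            obtain ⟨r2, hr2⟩ := ih2 (a ++ [PySem.List.pyGetD a (-1) [] ++ [PySem.List.pyGetD w j ' ']])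
            exact ⟨_, by simpa [List.append_assoc] using hr2⟩
      obtain ⟨r1, hr1⟩ := hin (PySem.List.pyRange (i + 1) (w.length : Int))
        (acc ++ [[PySem.List.pyGetD w i ' ']])
      obtain ⟨r, hr⟩ := ih (acc ++ [[PySem.List.pyGetD w i ' ']] ++ r1)
      refine ⟨[[PySem.List.pyGetD w i ' ']] ++ r1 ++ r, ?_⟩
      simp only [List.foldl_cons]
      rw [hr1, hr]
      simp [List.append_assoc]

-- l1 as computed by A is exactly the prefix list
theorem pvSliceA_eq (w : List Char) (hw : w ≠ []) :
    PySem.List.slice (pvSubseqA w) none (some (w.length : Int)) = pvPrefs w := by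
  rw [PySem.List.slice_to_natCast]
  obtain ⟨c, t⟩ := List.exists_cons_of_ne_nil hw
  obtain ⟨t, rfl⟩ := t
  unfold pvSubseqA
  rcases eq_or_ne t [] with rfl | ht
  · have h1 : PySem.List.pyGetD [c] (-1) ' ' = c := by
      simpa using pvGetD_neg_one_append ([] : List Char) c ' '
    simp [PySem.List.pyRange, pvPrefs, h1]
  · have hn : 2 ≤ (c :: t).length := by
      cases t with
      | nil => exact absurd rfl ht
      | cons a b => simp only [List.length_cons]; omega
    have h01 : (0 : Int) < ((c :: t).length : Int) - 1 := by omega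
    rw [PySem.List.pyRange_one_cons h01]
    simp only [List.foldl_cons, List.nil_append, zero_add]
    have h0 : PySem.List.pyGetD (c :: t) (0 : Int) ' ' = c := by
      exact PySem.List.pyGetD_ofNat (c :: t) 0 ' ' (by simp)
    have hinner := pvInner (c :: t) t.length 1 (by omega) (by simp; omega) [[c]]
      (by simpa using pvGetD_neg_one_append ([] : List (List Char)) [c] [])
    simp only [Nat.cast_one] at hinner
    rw [h0, hinner]
    obtain ⟨r, hr⟩ := pvOuter_prefix (c :: t) (PySem.List.pyRange (1 : Int) (((c :: t).length : Int) - 1))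
      ([[c]] ++ (List.range t.length).map (fun i => (c :: t).take (1 + 1 + i)))
    rw [hr]
    have hP : pvPrefs (c :: t)
        = [[c]] ++ (List.range t.length).map (fun i => (c :: t).take (1 + 1 + i)) := by
      unfold pvPrefs
      simp only [List.length_cons, List.range_succ_eq_map, List.map_cons, List.map_map,
        List.singleton_append]
      refine congrArg₂ _ rfl ?_
      refine List.map_congr_left ?_
      intro a _
      simp only [Function.comp_apply]
      congr 1
      omega
    have hPlen : ([[c]] ++ (List.range t.length).map (fun i => (c :: t).take (1 + 1 + i))).length
        = (c :: t).length := by simp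
    rw [List.append_assoc, ← hPlen, List.take_left]
    exact hP.symm

-- ===== VERDICT (by name: the statement is the Claim_ definition above) =====
theorem create_list_of_2_names_spec : Claim_equal_create_list_of_2_names := by
  intro word1 word2 _ hpre
  unfold Spec_create_list_of_2_names create_list_of_2_names create_list_of_2_names_alt
  rw [pvSliceA_eq word1.toList hpre.1, pvSliceA_eq word2.toList hpre.2,
    pvPrefixes_eq, pvPrefixes_eq]
  dsimp only
  congr 1
  calc (pvPrefs word1.toList).foldl
        (fun out ch1 => (pvPrefs word2.toList).foldl (fun out ch2 => out ++ [ch1 ++ ch2]) out) []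
      = (pvPrefs word1.toList).foldl
        (fun out ch1 => out ++ (pvPrefs word2.toList).map (fun ch2 => ch1 ++ ch2)) [] :=
        PySem.List.foldl_congr_mem _ _ _ _ (fun acc x _ => PySem.List.foldl_append_singleton_eq_map _ _ _)
    _ = [] ++ (pvPrefs word1.toList).flatMap
          (fun a => (pvPrefs word2.toList).map (fun b => a ++ b)) :=
        PySem.List.foldl_append_eq_flatMap _ _ _
    _ = _ := by simp

def create_list_of_2_names_raises : Claim_raises_create_list_of_2_names := by
  unfold Claim_raises_create_list_of_2_names
  refine ⟨?_, by decide⟩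
  intro w1 w2 _ hr hpre
  rcases hr with h | h
  · exact hpre.1 h
  · exact hpre.2 h
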